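-- pv_equiv track=rewrite | github.com/ad-aspera/Peak_Detection | Data Validation.py | compare_r_peaks
-- ===== SOURCE A (Python) =====
-- def compare_r_peaks(indices1, indices2, tolerance=5):
--     #Checks if each peak in  has a corresponding peak in peaks2 within a given tolerance.
--     matches = []
--
--     for p1 in indices1:
--         if any(abs(p1 - p2) <= tolerance for p2 in indices2):
--             matches.append(True)  # Found a match within tolerance
--         else:
--             matches.append(False)  # No match found
--
--     return matches
-- ===== SOURCE B (Python) =====
-- def compare_r_peaks(indices1, indices2, tolerance=5):
--     # Sort indices2 once, then binary-search the first candidate >= p - tolerance per peak.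
--     s = sorted(indices2)
--     n = len(s)
--     result = []
--     for p in indices1:
--         lo, hi = 0, n
--         target = p - tolerance
--         while lo < hi:
--             mid = (lo + hi) // 2
--             if s[mid] < target:
--                 lo = mid + 1
--             else:
--                 hi = mid
--         result.append(lo < n and s[lo] <= p + tolerance)
--     return result
-- ===== Notes on version B (the rewrite author's own statement) =====
-- stated objective: faster
-- what changed: B sorts indices2 once and answers each peak with a binary search for the first candidate >= p - tolerance, instead of A's linear scan of indices2 per peak.
import Mathlib
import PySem

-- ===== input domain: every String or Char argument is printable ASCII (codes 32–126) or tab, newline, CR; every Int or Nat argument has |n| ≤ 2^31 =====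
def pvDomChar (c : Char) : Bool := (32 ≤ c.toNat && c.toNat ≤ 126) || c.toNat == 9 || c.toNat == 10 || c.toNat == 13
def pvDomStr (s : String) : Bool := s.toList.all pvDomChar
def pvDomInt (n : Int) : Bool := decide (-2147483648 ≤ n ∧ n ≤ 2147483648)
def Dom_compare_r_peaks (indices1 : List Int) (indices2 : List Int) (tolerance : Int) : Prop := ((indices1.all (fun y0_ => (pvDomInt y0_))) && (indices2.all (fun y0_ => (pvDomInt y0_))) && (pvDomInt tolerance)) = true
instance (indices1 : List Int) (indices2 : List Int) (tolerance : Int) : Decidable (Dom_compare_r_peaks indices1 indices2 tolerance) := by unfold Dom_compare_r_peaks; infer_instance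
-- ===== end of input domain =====

-- B sorts indices2 once and binary-searches per peak instead of scanning all of indices2 for each peak (asymptotically faster).


-- ===== PORT A =====
def compare_r_peaks (indices1 : List Int) (indices2 : List Int) (tolerance : Int) : List Bool :=
  indices1.foldl (fun matches_ p1 =>
    if indices2.any (fun p2 => decide (|p1 - p2| ≤ tolerance)) then
      matches_ ++ [true]
    else
      matches_ ++ [false]) []

-- ===== PORT B =====
-- the 'while lo < hi' loop of Source B; s[mid] is always in range there (lo ≤ mid < hi ≤ len s), ported with getD
def pvBsearch (s : List Int) (target : Int) (lo hi : Nat) : Nat :=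
  if _h : lo < hi then
    let mid := (lo + hi) / 2
    if s.getD mid 0 < target then pvBsearch s target (mid + 1) hi
    else pvBsearch s target lo mid
  else lo
termination_by hi - lo
decreasing_by all_goals omega

def compare_r_peaks_alt (indices1 : List Int) (indices2 : List Int) (tolerance : Int) : List Bool :=
  let s := PySem.List.sorted indices2 (fun x => x) false
  let n := s.length
  indices1.foldl (fun result p =>
    let lo := pvBsearch s (p - tolerance) 0 n
    result ++ [decide (lo < n) && decide (s.getD lo 0 ≤ p + tolerance)]) []

-- ===== PRECONDITION & SPEC =====
def Spec_compare_r_peaks (indices1 : List Int) (indices2 : List Int) (tolerance : Int) (out : List Bool) : Prop := out = compare_r_peaks_alt indices1 indices2 tolerance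
instance (indices1 : List Int) (indices2 : List Int) (tolerance : Int) (out : List Bool) : Decidable (Spec_compare_r_peaks indices1 indices2 tolerance out) := by unfold Spec_compare_r_peaks; infer_instance

-- ===== CLAIM (what is proved, stated in full; the proofs are below) =====
def Claim_equal_compare_r_peaks : Prop := ∀ (indices1 : List Int) (indices2 : List Int) (tolerance : Int), Dom_compare_r_peaks indices1 indices2 tolerance → Spec_compare_r_peaks indices1 indices2 tolerance (compare_r_peaks indices1 indices2 tolerance)

-- ===== LEMMAS AND PROOFS =====

theorem pv_foldl_app (f : Int → Bool) (l : List Int) (acc : List Bool) :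
    l.foldl (fun m p => m ++ [f p]) acc = acc ++ l.map f := by
  induction l generalizing acc with
  | nil => simp
  | cons x xs ih => simp [List.foldl, ih]

theorem pv_sorted_mono {s : List Int} (hs : s.Pairwise (· ≤ ·)) {i j : Nat}
    (hij : i ≤ j) (hj : j < s.length) : s.getD i 0 ≤ s.getD j 0 := by
  rcases Nat.lt_or_eq_of_le hij with h | h
  · have := List.pairwise_iff_getElem.mp hs i j (lt_of_le_of_lt hij hj) hj h
    rwa [List.getD_eq_getElem s 0 (lt_of_le_of_lt hij hj), List.getD_eq_getElem s 0 hj]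
  · subst h; exact le_refl _

theorem pvBsearch_spec {s : List Int} (hs : s.Pairwise (· ≤ ·)) (target : Int) :
    ∀ (n lo hi : Nat), hi - lo ≤ n → hi ≤ s.length → lo ≤ hi →
    (∀ j, j < lo → s.getD j 0 < target) →
    (∀ j, hi ≤ j → j < s.length → target ≤ s.getD j 0) →
    lo ≤ pvBsearch s target lo hi ∧ pvBsearch s target lo hi ≤ hi ∧
    (∀ j, j < pvBsearch s target lo hi → s.getD j 0 < target) ∧
    (∀ j, pvBsearch s target lo hi ≤ j → j < s.length → target ≤ s.getD j 0) := by
  intro n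
  induction n with
  | zero =>
    intro lo hi hfuel hhi hlohi hlow hhigh
    have h : ¬ lo < hi := by omega
    rw [pvBsearch, dif_neg h]
    exact ⟨le_refl _, hlohi, hlow, fun j hj => hhigh j (by omega)⟩
  | succ n ih =>
    intro lo hi hfuel hhi hlohi hlow hhigh
    by_cases h : lo < hi
    · rw [pvBsearch, dif_pos h]
      simp only
      by_cases hc : s.getD ((lo + hi) / 2) 0 < target
      · rw [if_pos hc]
        have ⟨h1, h2, h3, h4⟩ := ih ((lo + hi) / 2 + 1) hi (by omega) hhi (by omega)
          (fun j hj => lt_of_le_of_lt (pv_sorted_mono hs (by omega) (by omega)) hc)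
          hhigh
        exact ⟨by omega, h2, h3, h4⟩
      · rw [if_neg hc]
        have ⟨h1, h2, h3, h4⟩ := ih lo ((lo + hi) / 2) (by omega) (by omega) (by omega) hlow
          (fun j hj hjlen => le_trans (not_lt.mp hc) (pv_sorted_mono hs hj hjlen))
        exact ⟨h1, by omega, h3, h4⟩
    · rw [pvBsearch, dif_neg h]
      exact ⟨le_refl _, hlohi, hlow, fun j hj => hhigh j (by omega)⟩

theorem pv_elem_eq (indices2 : List Int) (tolerance p : Int) :
    (decide (pvBsearch (PySem.List.sorted indices2 (fun x => x) false) (p - tolerance) 0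
        (PySem.List.sorted indices2 (fun x => x) false).length <
        (PySem.List.sorted indices2 (fun x => x) false).length) &&
     decide ((PySem.List.sorted indices2 (fun x => x) false).getD
        (pvBsearch (PySem.List.sorted indices2 (fun x => x) false) (p - tolerance) 0
          (PySem.List.sorted indices2 (fun x => x) false).length) 0 ≤ p + tolerance)) =
    indices2.any (fun p2 => decide (|p - p2| ≤ tolerance)) := by
  set s := PySem.List.sorted indices2 (fun x => x) false with hsdef
  have hs : s.Pairwise (· ≤ ·) := by
    simpa using PySem.List.sorted_pairwise (xs := indices2) (key := fun x => x)
  set t := p - tolerance with ht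
  set lo := pvBsearch s t 0 s.length with hlo
  obtain ⟨h1, h2, h3, h4⟩ := pvBsearch_spec hs t s.length 0 s.length (by omega)
    (le_refl _) (Nat.zero_le _) (by omega) (fun j hj hjlen => by omega)
  rw [Bool.eq_iff_iff]
  simp only [Bool.and_eq_true, decide_eq_true_iff, List.any_eq_true]
  constructor
  · rintro ⟨hlt, hle⟩
    refine ⟨s.getD lo 0, ?_, ?_⟩
    · have : s.getD lo 0 ∈ s := by
        rw [List.getD_eq_getElem s 0 hlt]; exact List.getElem_mem hlt
      rwa [hsdef, PySem.List.mem_sorted] at this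
    · have := h4 lo (le_refl _) hlt
      rw [abs_le]; omega
  · rintro ⟨x, hx, hax⟩
    have hxs : x ∈ s := by
      rw [hsdef, PySem.List.mem_sorted]; exact hx
    obtain ⟨j, hjlen, hjx⟩ := List.mem_iff_getElem.mp hxs
    have hxj : s.getD j 0 = x := by rw [List.getD_eq_getElem s 0 hjlen, hjx]
    rw [abs_le] at hax
    have hjlo : lo ≤ j := by
      by_contra hc
      have := h3 j (by omega)
      omega
    refine ⟨by omega, ?_⟩
    have := pv_sorted_mono hs hjlo hjlen
    omega

theorem pv_A_eq_map (indices1 indices2 : List Int) (tolerance : Int) :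
    compare_r_peaks indices1 indices2 tolerance =
      indices1.map (fun p1 => indices2.any (fun p2 => decide (|p1 - p2| ≤ tolerance))) := by
  unfold compare_r_peaks
  have : (fun (matches_ : List Bool) (p1 : Int) =>
      if indices2.any (fun p2 => decide (|p1 - p2| ≤ tolerance)) then
        matches_ ++ [true] else matches_ ++ [false]) =
      (fun m p1 => m ++ [indices2.any (fun p2 => decide (|p1 - p2| ≤ tolerance))]) := by
    funext m p1
    cases h : indices2.any (fun p2 => decide (|p1 - p2| ≤ tolerance)) <;> simp
  rw [this, pv_foldl_app]
  simp

-- ===== VERDICT (by name: the statement is the Claim_ definition above) =====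
theorem compare_r_peaks_spec : Claim_equal_compare_r_peaks := by
  intro indices1 indices2 tolerance _
  unfold Spec_compare_r_peaks compare_r_peaks_alt
  rw [pv_A_eq_map, pv_foldl_app]
  simp only [List.nil_append]
  apply List.map_congr_left
  intro p _
  exact (pv_elem_eq indices2 tolerance p).symm
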